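-- pv_equiv track=rewrite | github.com/readthedocs/readthedocs.org | readthedocs/core/utils/url.py | urlpattern_to_plain_text
-- ===== SOURCE A (Python) =====
-- def urlpattern_to_plain_text(urlpattern):
--     """
--     Remove all regex special characters from a URL pattern.
--
--     URL patterns are regular expressions with replacement fields,
--     we remove all special regex characters to have a plain text
--     representation of the URL. Replacement fields are left untouched.
--
--     For example:
--
--         ^/{language}/{version}$
--
--     Would be transformed to:
--
--         /{language}/{version}
--
--     .. note::
--
--        To escape a regex instead of removing its characters, use ``re.escape``.
--     """
--     remove = {"(", ")", "?", "$", "^"}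
--     plain_urlpattern = []
--     is_escaped = False
--     for c in urlpattern:
--         # If the character is escaped, we don't
--         # need to check if it's a special.
--         if is_escaped:
--             is_escaped = False
--             plain_urlpattern.append(c)
--             continue
--
--         if c == "\\":
--             is_escaped = True
--             continue
--
--         if c not in remove:
--             plain_urlpattern.append(c)
--
--     return "".join(plain_urlpattern)
-- ===== SOURCE B (Python) =====
-- def urlpattern_to_plain_text(urlpattern):
--     """Plain-text form of a URL pattern: split the string on backslashes,
--     filter specials from each chunk, and re-glue honouring escapes."""
--     def keep(s):
--         return "".join(c for c in s if c not in "()?$^")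
--
--     parts = urlpattern.split("\\")
--     pieces = [keep(parts[0])]
--     i = 1
--     while i < len(parts):
--         p = parts[i]
--         if p:
--             # backslash escaped p[0]: keep it literally
--             pieces.append(p[0] + keep(p[1:]))
--             i += 1
--         elif i + 1 < len(parts):
--             # two consecutive backslashes: an escaped backslash
--             pieces.append("\\" + keep(parts[i + 1]))
--             i += 2
--         else:
--             # trailing lone backslash: dropped
--             i += 1
--     return "".join(pieces)
-- ===== Notes on version B (the rewrite author's own statement) =====
-- stated objective: alternative
-- what changed: B replaces A's per-character escape-flag state machine with a staged approach: split the string on backslashes, filter specials chunk-wise, and re-glue the chunks treating each chunk's first character (and empty chunks, i.e. double backslashes) as escaped.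
import Mathlib
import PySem

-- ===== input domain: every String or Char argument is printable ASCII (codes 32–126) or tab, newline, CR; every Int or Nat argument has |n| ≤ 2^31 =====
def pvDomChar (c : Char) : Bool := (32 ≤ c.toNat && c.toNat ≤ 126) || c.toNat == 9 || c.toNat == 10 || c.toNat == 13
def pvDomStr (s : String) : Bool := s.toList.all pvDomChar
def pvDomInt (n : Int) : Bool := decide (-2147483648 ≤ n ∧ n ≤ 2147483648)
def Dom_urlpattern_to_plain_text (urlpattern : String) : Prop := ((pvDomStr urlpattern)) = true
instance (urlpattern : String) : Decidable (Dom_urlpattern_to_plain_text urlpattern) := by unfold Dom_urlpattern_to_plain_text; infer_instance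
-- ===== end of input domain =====

-- B replaces A's per-character escape-flag state machine with a staged approach:
-- split on backslashes, filter specials chunk-wise, re-glue honouring escapes (alternative, same cost).

-- ===== PORT A =====
-- A's set literal {"(", ")", "?", "$", "^"} (a set of 1-char strings, modelled by their chars)
def pvRemoveA : PySem.Set Char := PySem.Set.ofList ['(', ')', '?', '$', '^']

-- A's loop state: (plain_urlpattern, is_escaped); "".join at the end
def pvStepA (st : List Char × Bool) (c : Char) : List Char × Bool :=
  if st.2 then (st.1 ++ [c], false)
  else if c = '\\' then (st.1, true)
  else if PySem.Set.contains pvRemoveA c then st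
  else (st.1 ++ [c], false)

def urlpattern_to_plain_text (urlpattern : String) : String :=
  String.ofList (urlpattern.toList.foldl pvStepA ([], false)).1

-- ===== PORT B =====
-- B's membership test `c not in "()?$^"` (the string's characters)
def pvSpecialsB : List Char := ['(', ')', '?', '$', '^']

-- B's helper keep: "".join(c for c in s if c not in "()?$^")
def pvKeep (s : List Char) : List Char := s.filter (fun c => !pvSpecialsB.contains c)

-- urlpattern.split("\\") on the character list
def pvSplitBS : List Char → List (List Char)
  | [] => [[]]
  | c :: rest =>
      if c = '\\' then [] :: pvSplitBS rest
      else
        match pvSplitBS rest with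
        | [] => [[c]]          -- unreachable: split is never empty
        | p :: ps => (c :: p) :: ps

-- B's while loop over parts[1:]: a nonempty part's first char is escaped (kept literally);
-- an empty part followed by another part is an escaped backslash (consume two parts);
-- a trailing empty part is a lone trailing backslash (dropped).
def pvGlue : List (List Char) → List Char
  | [] => []
  | [] :: [] => []
  | [] :: q :: rest => '\\' :: (pvKeep q ++ pvGlue rest)
  | (d :: ds) :: rest => d :: (pvKeep ds ++ pvGlue rest)

def urlpattern_to_plain_text_alt (urlpattern : String) : String :=
  String.ofList
    (match pvSplitBS urlpattern.toList with
     | [] => []                  -- unreachable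
     | p :: ps => pvKeep p ++ pvGlue ps)

-- ===== PRECONDITION & SPEC =====
def Spec_urlpattern_to_plain_text (urlpattern : String) (out : String) : Prop := out = urlpattern_to_plain_text_alt urlpattern
instance (urlpattern : String) (out : String) : Decidable (Spec_urlpattern_to_plain_text urlpattern out) := by unfold Spec_urlpattern_to_plain_text; infer_instance

-- ===== CLAIM (what is proved, stated in full; the proofs are below) =====
def Claim_equal_urlpattern_to_plain_text : Prop := ∀ (urlpattern : String), Dom_urlpattern_to_plain_text urlpattern → Spec_urlpattern_to_plain_text urlpattern (urlpattern_to_plain_text urlpattern)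

-- ===== LEMMAS AND PROOFS =====

-- common recursive specification of the result, used as a bridge between the two ports
def pvGo : List Char → List Char
  | [] => []
  | '\\' :: rest =>
      match rest with
      | [] => []
      | d :: rest' => d :: pvGo rest'
  | c :: rest => if pvSpecialsB.contains c then pvGo rest else c :: pvGo rest

lemma pv_foldl_eq : ∀ (cs : List Char) (acc : List Char),
    (cs.foldl pvStepA (acc, false)).1 = acc ++ pvGo cs := by
  intro cs
  induction cs using pvGo.induct with
  | case1 => intro acc; simp [pvGo]
  | case2 => intro acc; simp [List.foldl, pvStepA, pvGo]
  | case3 d rest' ih =>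
      intro acc
      simp [List.foldl, pvStepA, pvGo, ih]
  | case4 c rest hc hm ih =>
      intro acc
      simp only [pvSpecialsB, List.contains_eq_mem, List.mem_cons, List.not_mem_nil, or_false,
        decide_eq_true_eq] at hm
      rcases hm with rfl | rfl | rfl | rfl | rfl <;>
        simp [List.foldl, pvStepA, pvGo, ih, pvRemoveA, pvSpecialsB]
  | case5 c rest hc hm ih =>
      intro acc
      have hc' : ¬ c = '\\' := hc
      simp only [pvSpecialsB, List.contains_eq_mem, List.mem_cons, List.not_mem_nil, or_false,
        decide_eq_true_eq, not_or] at hm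
      simp [List.foldl, pvStepA, pvGo, pvSpecialsB, ih, hc', hm,
        show pvRemoveA = ['(', ')', '?', '$', '^'] from rfl]

lemma pvSplitBS_ne_nil (cs : List Char) : pvSplitBS cs ≠ [] := by
  cases cs with
  | nil => simp [pvSplitBS]
  | cons c rest =>
      unfold pvSplitBS
      split_ifs
      · simp
      · cases h : pvSplitBS rest <;> simp

lemma pv_split_eq : ∀ (cs : List Char),
    (match pvSplitBS cs with
     | [] => []
     | p :: ps => pvKeep p ++ pvGlue ps) = pvGo cs := by
  intro cs
  induction cs using pvGo.induct with
  | case1 => simp [pvSplitBS, pvKeep, pvGlue, pvGo]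
  | case2 => simp [pvSplitBS, pvKeep, pvGlue, pvGo]
  | case3 d rest' ih =>
      by_cases hd : d = '\\'
      · subst hd
        cases h : pvSplitBS rest' with
        | nil => exact absurd h (pvSplitBS_ne_nil rest')
        | cons p ps =>
          simp only [pvSplitBS, if_pos rfl, pvGo, h]
          simp only [h] at ih
          simpa [pvGlue, pvKeep] using ih
      · cases h : pvSplitBS rest' with
        | nil => exact absurd h (pvSplitBS_ne_nil rest')
        | cons p ps =>
          simp only [pvSplitBS, if_pos rfl, if_neg hd, pvGo, h]
          simp only [h] at ih
          simpa [pvGlue, pvKeep] using ih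
  | case4 c rest hc hm ih =>
      cases h : pvSplitBS rest with
      | nil => exact absurd h (pvSplitBS_ne_nil rest)
      | cons p ps =>
        have hc' : ¬ c = '\\' := hc
        have hmem : c ∈ pvSpecialsB := by
          simpa [List.contains_eq_mem] using hm
        simp only [pvSplitBS, if_neg hc', h]
        simp only [h] at ih
        cases p with
        | nil => simp [pvGlue, pvKeep, hmem, pvGo, hc', ← ih]
        | cons d ds => simp [pvGlue, pvKeep, hmem, pvGo, hc', ← ih]
  | case5 c rest hc hm ih =>
      cases h : pvSplitBS rest with
      | nil => exact absurd h (pvSplitBS_ne_nil rest)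
      | cons p ps =>
        have hc' : ¬ c = '\\' := hc
        have hmem : c ∉ pvSpecialsB := by
          simpa [List.contains_eq_mem] using hm
        simp only [pvSplitBS, if_neg hc', h]
        simp only [h] at ih
        cases p with
        | nil => simp [pvGlue, pvKeep, hmem, pvGo, hc', ← ih]
        | cons d ds => simp [pvGlue, pvKeep, hmem, pvGo, hc', ← ih]

-- ===== VERDICT (by name: the statement is the Claim_ definition above) =====
theorem urlpattern_to_plain_text_spec : Claim_equal_urlpattern_to_plain_text := by
  intro s _
  unfold Spec_urlpattern_to_plain_text urlpattern_to_plain_text urlpattern_to_plain_text_alt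
  rw [pv_foldl_eq s.toList [], pv_split_eq s.toList]
  rfl
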